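-- pv_equiv track=rewrite | github.com/kilibarda4/natural-language-processing | hidden_markov_model/hmm.py | create_counts
-- ===== SOURCE A (Python) =====
-- def create_counts(sentences):
--
--     transition_counts = {}
--     emission_counts = {}
--     tag_counts = {}
--     start_tag_counts = {}
--
--     for sentence in sentences:
--         previous_tag = None
--         for word, tag in sentence:
--             # Increment the tag counts
--             tag_counts[tag] = tag_counts.get(tag, 0) + 1
--
--             # Increment the emission counts
--             if tag not in emission_counts:
--                 emission_counts[tag] = {}
--             emission_counts[tag][word] = emission_counts[tag].get(word, 0) + 1
--
--             # Increment the transition counts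
--             if previous_tag is not None:
--                 if previous_tag not in transition_counts:
--                     transition_counts[previous_tag] = {}
--                 transition_counts[previous_tag][tag] = transition_counts[previous_tag].get(tag, 0) + 1
--             else:
--                 # If this is the first word in a sentence, increment the start tag counts
--                 start_tag_counts[tag] = start_tag_counts.get(tag, 0) + 1
--             # Set the previous tag for the next iteration
--             previous_tag = tag
--     return transition_counts, emission_counts, tag_counts, start_tag_counts
-- ===== SOURCE B (Python) =====
-- def create_counts(sentences):
--     transition_counts = {}
--     emission_counts = {}
--     tag_counts = {}
--     start_tag_counts = {}
--
--     # Pass 1: start tags from each sentence's first token, transitions from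
--     # adjacent tag pairs (zip of the tag list with its tail).
--     for sentence in sentences:
--         if sentence:
--             first_tag = sentence[0][1]
--             start_tag_counts[first_tag] = start_tag_counts.get(first_tag, 0) + 1
--         tags = [tag for _, tag in sentence]
--         for prev, nxt in zip(tags, tags[1:]):
--             inner = transition_counts.get(prev, {})
--             inner[nxt] = inner.get(nxt, 0) + 1
--             transition_counts[prev] = inner
--
--     # Pass 2: per-token tag and emission counts.
--     for sentence in sentences:
--         for word, tag in sentence:
--             inner = emission_counts.get(tag, {})
--             inner[word] = inner.get(word, 0) + 1
--             emission_counts[tag] = inner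
--             tag_counts[tag] = tag_counts.get(tag, 0) + 1
--     return transition_counts, emission_counts, tag_counts, start_tag_counts
-- ===== Notes on version B (the rewrite author's own statement) =====
-- stated objective: simpler
-- what changed: A threads a previous_tag sentinel through one interleaved loop updating all four dicts; B makes two independent passes: one that reads each sentence's first tag and zips the tag list with its tail for transitions, and one per-token pass for tag and emission counts.
import Mathlib
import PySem

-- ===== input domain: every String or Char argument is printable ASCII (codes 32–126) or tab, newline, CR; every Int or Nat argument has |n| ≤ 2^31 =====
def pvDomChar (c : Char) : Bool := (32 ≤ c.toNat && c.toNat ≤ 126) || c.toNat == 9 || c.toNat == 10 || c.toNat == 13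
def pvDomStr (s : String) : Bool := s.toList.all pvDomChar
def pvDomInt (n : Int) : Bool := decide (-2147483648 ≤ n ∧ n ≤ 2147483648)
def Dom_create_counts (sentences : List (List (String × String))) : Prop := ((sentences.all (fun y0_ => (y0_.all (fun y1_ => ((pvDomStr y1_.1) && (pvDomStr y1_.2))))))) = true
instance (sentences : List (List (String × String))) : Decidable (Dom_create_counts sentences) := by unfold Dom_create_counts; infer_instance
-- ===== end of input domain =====

-- B replaces A's single interleaved loop carrying previous_tag with two passes:
-- pass 1 reads each sentence's first tag and zips the tag list with its tail for
-- transitions, pass 2 counts tags and emissions per token (objective: simpler).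

-- ===== PORT A =====
abbrev DI := PySem.Dict String Int
abbrev DD := PySem.Dict String DI

-- one iteration of A's inner `for word, tag in sentence` body
def aTok (st : DD × DD × DI × DI × Option String) (wt : String × String) :
    DD × DD × DI × DI × Option String :=
  match st, wt with
  | (t, e, tc, stc, prev), (word, tag) =>
    let tc' := tc.insert tag (tc.getD tag 0 + 1)
    let e1 := if e.contains tag then e else e.insert tag PySem.Dict.empty
    let einner := e1.getD tag PySem.Dict.empty
    let e' := e1.insert tag (einner.insert word (einner.getD word 0 + 1))
    match prev with
    | some pt =>
        let t1 := if t.contains pt then t else t.insert pt PySem.Dict.empty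
        let tinner := t1.getD pt PySem.Dict.empty
        (t1.insert pt (tinner.insert tag (tinner.getD tag 0 + 1)), e', tc', stc, some tag)
    | none =>
        (t, e', tc', stc.insert tag (stc.getD tag 0 + 1), some tag)

def create_counts (sentences : List (List (String × String))) : (List (String × List (String × Int))) × (List (String × List (String × Int))) × (List (String × Int)) × (List (String × Int)) :=
  let st := sentences.foldl
    (fun st s => s.foldl aTok (st.1, st.2.1, st.2.2.1, st.2.2.2.1, none))
    (PySem.Dict.empty, PySem.Dict.empty, PySem.Dict.empty, PySem.Dict.empty, none)
  (st.1.items.map (fun p => (p.1, p.2.items)),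
   st.2.1.items.map (fun p => (p.1, p.2.items)),
   st.2.2.1.items, st.2.2.2.1.items)

-- ===== PORT B =====
-- pass 1, one sentence: start tag of the first token, then adjacent tag pairs
def bSent (st : DD × DI) (s : List (String × String)) : DD × DI :=
  let stc := match s with
    | [] => st.2
    | (_, ft) :: _ => st.2.insert ft (st.2.getD ft 0 + 1)
  let tags := s.map Prod.snd
  let t := (tags.zip tags.tail).foldl
    (fun d pn =>
      let inner := d.getD pn.1 PySem.Dict.empty
      d.insert pn.1 (inner.insert pn.2 (inner.getD pn.2 0 + 1))) st.1
  (t, stc)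

-- pass 2, one token: emission and tag counts
def bTok (st : DD × DI) (wt : String × String) : DD × DI :=
  let inner := st.1.getD wt.2 PySem.Dict.empty
  (st.1.insert wt.2 (inner.insert wt.1 (inner.getD wt.1 0 + 1)),
   st.2.insert wt.2 (st.2.getD wt.2 0 + 1))

def create_counts_alt (sentences : List (List (String × String))) : (List (String × List (String × Int))) × (List (String × List (String × Int))) × (List (String × Int)) × (List (String × Int)) :=
  let p1 := sentences.foldl bSent (PySem.Dict.empty, PySem.Dict.empty)
  let p2 := sentences.foldl (fun st s => s.foldl bTok st) (PySem.Dict.empty, PySem.Dict.empty)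
  (p1.1.items.map (fun p => (p.1, p.2.items)),
   p2.1.items.map (fun p => (p.1, p.2.items)),
   p2.2.items, p1.2.items)

-- ===== PRECONDITION & SPEC =====
def Spec_create_counts (sentences : List (List (String × String))) (out : (List (String × List (String × Int))) × (List (String × List (String × Int))) × (List (String × Int)) × (List (String × Int))) : Prop := out = create_counts_alt sentences
instance (sentences : List (List (String × String))) (out : (List (String × List (String × Int))) × (List (String × List (String × Int))) × (List (String × Int)) × (List (String × Int))) : Decidable (Spec_create_counts sentences out) := by unfold Spec_create_counts; infer_instance

-- ===== CLAIM (what is proved, stated in full; the proofs are below) =====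
def Claim_equal_create_counts : Prop := ∀ (sentences : List (List (String × String))), Dom_create_counts sentences → Spec_create_counts sentences (create_counts sentences)

-- ===== LEMMAS AND PROOFS =====

-- overwriting a just-inserted key is one insert
theorem insert_insert_self {κ ν : Type} [BEq κ] [LawfulBEq κ] (d : PySem.Dict κ ν) (k : κ) (v w : ν) :
    (d.insert k v).insert k w = d.insert k w := by
  apply PySem.Dict.ext
  have hne : ∀ p ∈ d.items, d.contains k = false → (p.1 == k) = false := by
    intro p hp hc
    by_contra hk
    have hk' : p.1 = k := by simpa using (by simpa using hk : (p.1 == k) = true)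
    have := (PySem.Dict.contains_iff_mem_keys d k).mpr (hk' ▸ PySem.Dict.mem_keys_of_mem_items d hp)
    simp [hc] at this
  by_cases h : d.contains k = true
  · simp only [PySem.Dict.items_insert, PySem.Dict.contains_insert_self, if_pos h,
      List.map_map]
    refine List.map_congr_left (fun p _ => ?_)
    by_cases hp : (p.1 == k) = true <;> simp [Function.comp, hp]
  · have hc : d.contains k = false := by simpa using h
    simp only [PySem.Dict.items_insert, PySem.Dict.contains_insert_self, hc,
      Bool.false_eq_true, if_false, List.map_append]
    have hmap : d.items.map (fun p => if (p.1 == k) = true then (k, w) else p) = d.items := by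
      rw [List.map_congr_left (g := id) (fun p hp => by simp [hne p hp hc]), List.map_id]
    rw [hmap]
    simp

-- A's "if absent insert {}, then update" equals B's "get-with-default, update, put back"
theorem upd_eq {κ : Type} [BEq κ] [LawfulBEq κ] (d : PySem.Dict κ DI) (k : κ)
    (f : DI → DI) :
    (if d.contains k then d else d.insert k PySem.Dict.empty).insert k
      (f ((if d.contains k then d else d.insert k PySem.Dict.empty).getD k PySem.Dict.empty))
    = d.insert k (f (d.getD k PySem.Dict.empty)) := by
  by_cases h : d.contains k = true
  · simp [h]
  · rw [if_neg (by simpa using h), PySem.Dict.getD_insert_self, insert_insert_self,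
      PySem.Dict.getD_of_not_contains d PySem.Dict.empty (by simpa using h)]

-- emission/tag (pass-2) projection of A's inner loop
theorem te_proj (s : List (String × String)) :
    ∀ (t e : DD) (tc stc : DI) (p : Option String),
      ((s.foldl aTok (t, e, tc, stc, p)).2.1, (s.foldl aTok (t, e, tc, stc, p)).2.2.1)
        = s.foldl bTok (e, tc) := by
  induction s with
  | nil => intro t e tc stc p; rfl
  | cons wt rest ih =>
    intro t e tc stc p
    obtain ⟨word, tag⟩ := wt
    have he := upd_eq e tag (fun inner => inner.insert word (inner.getD word 0 + 1))
    cases p with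
    | none =>
      simp only [List.foldl_cons, aTok, bTok]
      rw [he]; exact ih ..
    | some pt =>
      simp only [List.foldl_cons, aTok, bTok]
      rw [he]; exact ih ..

-- transition projection of A's inner loop after the first token (prev = some pt)
theorem trans_proj (rest : List (String × String)) :
    ∀ (pt : String) (t e : DD) (tc stc : DI),
      ((rest.foldl aTok (t, e, tc, stc, some pt)).1,
       (rest.foldl aTok (t, e, tc, stc, some pt)).2.2.2.1)
      = (((pt :: rest.map Prod.snd).zip (rest.map Prod.snd)).foldl
          (fun d pn =>
            let inner := d.getD pn.1 PySem.Dict.empty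
            d.insert pn.1 (inner.insert pn.2 (inner.getD pn.2 0 + 1))) t, stc) := by
  induction rest with
  | nil => intro pt t e tc stc; rfl
  | cons wt rest ih =>
    intro pt t e tc stc
    obtain ⟨word, tag⟩ := wt
    have ht := upd_eq t pt (fun inner => inner.insert tag (inner.getD tag 0 + 1))
    simp only [List.foldl_cons, aTok, List.map_cons, List.zip_cons_cons]
    rw [ht]
    exact ih ..

-- start/transition (pass-1) projection of A's inner loop over a whole sentence
theorem sent_proj (s : List (String × String)) (t e : DD) (tc stc : DI) :
    ((s.foldl aTok (t, e, tc, stc, none)).1,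
     (s.foldl aTok (t, e, tc, stc, none)).2.2.2.1)
    = bSent (t, stc) s := by
  cases s with
  | nil => rfl
  | cons wt rest =>
    obtain ⟨word, tag⟩ := wt
    simp only [List.foldl_cons, aTok, bSent, List.map_cons]
    rw [trans_proj]
    rfl

-- A's outer fold projects onto B's two passes
theorem main_proj (sentences : List (List (String × String))) :
    ∀ (t e : DD) (tc stc : DI) (p : Option String),
      (((sentences.foldl (fun st s => s.foldl aTok (st.1, st.2.1, st.2.2.1, st.2.2.2.1, none)) (t, e, tc, stc, p)).1,
        (sentences.foldl (fun st s => s.foldl aTok (st.1, st.2.1, st.2.2.1, st.2.2.2.1, none)) (t, e, tc, stc, p)).2.2.2.1),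
       ((sentences.foldl (fun st s => s.foldl aTok (st.1, st.2.1, st.2.2.1, st.2.2.2.1, none)) (t, e, tc, stc, p)).2.1,
        (sentences.foldl (fun st s => s.foldl aTok (st.1, st.2.1, st.2.2.1, st.2.2.2.1, none)) (t, e, tc, stc, p)).2.2.1))
      = (sentences.foldl bSent (t, stc),
         sentences.foldl (fun st s => s.foldl bTok st) (e, tc)) := by
  induction sentences with
  | nil => intro t e tc stc p; rfl
  | cons s rest ih =>
    intro t e tc stc p
    have h1 := sent_proj s t e tc stc
    have h2 := te_proj s t e tc stc none
    simp only [List.foldl_cons]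
    rw [← h1, ← h2]
    exact ih (s.foldl aTok (t, e, tc, stc, none)).1 (s.foldl aTok (t, e, tc, stc, none)).2.1
      (s.foldl aTok (t, e, tc, stc, none)).2.2.1 (s.foldl aTok (t, e, tc, stc, none)).2.2.2.1
      (s.foldl aTok (t, e, tc, stc, none)).2.2.2.2

-- ===== VERDICT (by name: the statement is the Claim_ definition above) =====
theorem create_counts_spec : Claim_equal_create_counts := by
  intro sentences _
  have h := main_proj sentences PySem.Dict.empty PySem.Dict.empty PySem.Dict.empty PySem.Dict.empty none
  exact congrArg (fun q : (DD × DI) × (DD × DI) =>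
    (q.1.1.items.map (fun p => (p.1, p.2.items)),
     q.2.1.items.map (fun p => (p.1, p.2.items)),
     q.2.2.items, q.1.2.items)) h
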